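-- pv_equiv track=rewrite | github.com/aminebes/Coding-Projects | Python-Card game problem part2/d5.py | prodLRec1
-- ===== SOURCE A (Python) =====
-- def prodLRec1(l):
--   if (len(l) == 0):
--       s = 1
--   else:
--       if l[0] > 0:
--         s = prodLRec1(l[1:]) * l[0]
--       else:
--         s = prodLRec1(l[1:])
--   return s
-- ===== SOURCE B (Python) =====
-- def prodLRec1(l):
--     s = 1
--     for x in reversed(l):
--         if x > 0:
--             s = s * x
--     return s
-- ===== Notes on version B (the rewrite author's own statement) =====
-- stated objective: simpler
-- what changed: Replaces the tail recursion with slicing (which copies the list at each step) by a single iterative loop over reversed(l) with an accumulator, multiplying in only strictly positive elements.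
import Mathlib
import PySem

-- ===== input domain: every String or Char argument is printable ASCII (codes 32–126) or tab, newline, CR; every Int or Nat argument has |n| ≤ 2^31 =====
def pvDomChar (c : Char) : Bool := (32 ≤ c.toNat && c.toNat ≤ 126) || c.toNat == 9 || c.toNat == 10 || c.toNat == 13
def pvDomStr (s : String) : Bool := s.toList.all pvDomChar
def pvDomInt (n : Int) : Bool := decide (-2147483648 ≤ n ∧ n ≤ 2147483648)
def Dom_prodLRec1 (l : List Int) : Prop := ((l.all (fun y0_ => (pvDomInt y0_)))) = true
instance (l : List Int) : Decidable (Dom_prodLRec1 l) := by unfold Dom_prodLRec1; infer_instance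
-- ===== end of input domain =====

-- ===== PORT A =====
def prodLRec1 : List Int → Int
  | [] => 1
  | x :: xs => if x > 0 then prodLRec1 xs * x else prodLRec1 xs

-- ===== PORT B =====
-- B replaces the slicing tail recursion by an iterative accumulator loop over the reversed list (simpler).
def prodLRec1_alt (l : List Int) : Int :=
  l.reverse.foldl (fun s x => if x > 0 then s * x else s) 1

-- ===== PRECONDITION & SPEC =====
def Spec_prodLRec1 (l : List Int) (out : Int) : Prop := out = prodLRec1_alt l
instance (l : List Int) (out : Int) : Decidable (Spec_prodLRec1 l out) := by unfold Spec_prodLRec1; infer_instance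

-- ===== CLAIM (what is proved, stated in full; the proofs are below) =====
def Claim_equal_prodLRec1 : Prop := ∀ (l : List Int), Dom_prodLRec1 l → Spec_prodLRec1 l (prodLRec1 l)

-- ===== LEMMAS AND PROOFS =====
theorem prodLRec1_eq_alt (l : List Int) : prodLRec1 l = prodLRec1_alt l := by
  induction l with
  | nil => rfl
  | cons x xs ih =>
      simp only [prodLRec1, prodLRec1_alt, List.reverse_cons, List.foldl_append, List.foldl] at *
      split_ifs <;> simp [ih]

-- ===== VERDICT (by name: the statement is the Claim_ definition above) =====
theorem prodLRec1_spec : Claim_equal_prodLRec1 := by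
  intro l _; exact prodLRec1_eq_alt l
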